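-- pv_equiv track=rewrite | github.com/EthanYeung513/CodeWars-Katas | 6 kyu/Reverse every other word in the string.py | reverse_alternate
-- ===== SOURCE A (Python) =====
-- def reverse_alternate(string):
--   newList = string.split()      #String into list
--   newString = ""
--   counter = 1                   #To alternate
--   for x in newList:
--       if counter % 2 == 0:           #For example, (1 % 2 != 2), (2 % 2 == 0) , (3 % 2 != 0) , (4 % 2 == 0) and so on.
--          newString += x[::-1] + " "          #Extended slice to reverse string, and add a space
--       else:
--          newString += x + " "
--       counter += 1    #Increment counter to alternate
--   newString = newString.strip()      #Remove whitespace before and after string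
--   return newString
-- ===== SOURCE B (Python) =====
-- def reverse_alternate(string):
--     def go(words):
--         if len(words) < 2:
--             return list(words)
--         return [words[0], words[1][::-1]] + go(words[2:])
--     return ' '.join(go(string.split()))
-- ===== Notes on version B (the rewrite author's own statement) =====
-- stated objective: alternative
-- what changed: Replaces the counter-and-branch loop (concatenate each word plus a trailing space, then strip) by a recursion that consumes the word list two words at a time -- keep the first, reverse the second, recurse on the rest -- with no parity counter, no modulo and no strip, joining the resulting list once with a single space.
import Mathlib
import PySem

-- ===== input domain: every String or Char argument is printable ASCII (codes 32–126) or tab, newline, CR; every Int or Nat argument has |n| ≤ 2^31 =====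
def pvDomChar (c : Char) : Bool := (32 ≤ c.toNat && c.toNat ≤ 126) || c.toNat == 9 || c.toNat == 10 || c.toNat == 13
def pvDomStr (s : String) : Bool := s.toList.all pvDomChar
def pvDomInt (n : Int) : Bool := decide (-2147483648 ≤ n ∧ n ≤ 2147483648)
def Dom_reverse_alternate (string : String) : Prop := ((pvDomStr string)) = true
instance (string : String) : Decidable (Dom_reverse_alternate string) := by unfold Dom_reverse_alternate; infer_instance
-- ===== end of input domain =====

-- B replaces A's parity-counter loop (concatenate each word + ' ', then strip) by a recursion that
-- consumes the word list two words at a time (keep the first, reverse the second) and joins once.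

-- ===== PORT A =====
-- x[::-1] has step -1 ≠ 0, so slice? is never none; the getD "" default is unreachable.
def reverse_alternate (string : String) : String :=
  let newList := PySem.Str.split₀ string
  let res := newList.foldl
    (fun (st : String × Int) x =>
      if PySem.Int.mod st.2 2 = 0 then
        (st.1 ++ ((PySem.Str.slice? x none none (-1)).getD "") ++ " ", st.2 + 1)
      else
        (st.1 ++ x ++ " ", st.2 + 1))
    ("", 1)
  PySem.Str.strip res.1

-- ===== PORT B =====
-- Source B's inner recursion go: keep words[0], reverse words[1], recurse on words[2:].
def pairsB : List String → List String
  | [] => []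
  | [w] => [w]
  | w :: x :: rest => w :: ((PySem.Str.slice? x none none (-1)).getD "") :: pairsB rest

def reverse_alternate_alt (string : String) : String :=
  PySem.Str.join " " (pairsB (PySem.Str.split₀ string))

-- ===== PRECONDITION & SPEC =====
def Spec_reverse_alternate (string : String) (out : String) : Prop := out = reverse_alternate_alt string
instance (string : String) (out : String) : Decidable (Spec_reverse_alternate string out) := by unfold Spec_reverse_alternate; infer_instance

-- ===== CLAIM (what is proved, stated in full; the proofs are below) =====
def Claim_equal_reverse_alternate : Prop := ∀ (string : String), Dom_reverse_alternate string → Spec_reverse_alternate string (reverse_alternate string)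

-- ===== LEMMAS AND PROOFS =====

-- Every word produced by str.split() is nonempty and contains no whitespace.
lemma split₀_go_words : ∀ (s cur : List Char) (acc : List (List Char)),
    (∀ c ∈ cur, PySem.Chars.isspace c = false) →
    (∀ w ∈ acc, w ≠ [] ∧ ∀ c ∈ w, PySem.Chars.isspace c = false) →
    ∀ w ∈ PySem.Chars.split₀.go s cur acc, w ≠ [] ∧ ∀ c ∈ w, PySem.Chars.isspace c = false := by
  intro s
  induction s with
  | nil =>
    intro cur acc hcur hacc w hw
    simp only [PySem.Chars.split₀.go] at hw
    split at hw
    · exact hacc w (by simpa using hw)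
    · next hne =>
      rw [List.mem_reverse, List.mem_cons] at hw
      rcases hw with h | h
      · subst h
        refine ⟨?_, ?_⟩
        · simp only [List.isEmpty_iff] at hne
          simpa [List.reverse_eq_nil_iff] using hne
        · intro c hc; exact hcur c (List.mem_reverse.mp hc)
      · exact hacc w h
  | cons c rest ih =>
    intro cur acc hcur hacc w hw
    simp only [PySem.Chars.split₀.go] at hw
    split at hw
    · split at hw
      · exact ih [] acc (by simp) hacc w hw
      · next hne =>
        refine ih [] _ (by simp) ?_ w hw
        intro v hv
        rcases List.mem_cons.mp hv with h | h
        · subst h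
          refine ⟨?_, ?_⟩
          · simp only [List.isEmpty_iff] at hne
            simpa [List.reverse_eq_nil_iff] using hne
          · intro d hd; exact hcur d (List.mem_reverse.mp hd)
        · exact hacc v h
    · next hcs =>
      refine ih (c :: cur) acc ?_ hacc w hw
      intro d hd
      rcases List.mem_cons.mp hd with h | h
      · subst h; exact Bool.not_eq_true _ |>.mp hcs
      · exact hcur d h

lemma split₀_words (s : List Char) :
    ∀ w ∈ PySem.Chars.split₀ s, w ≠ [] ∧ ∀ c ∈ w, PySem.Chars.isspace c = false := by
  have := split₀_go_words s [] [] (by simp) (by simp)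
  simpa [PySem.Chars.split₀] using this

-- A's loop, characterised: starting from an odd counter, the accumulated string is the
-- flattening of pairsB's output with one space after each word.
lemma foldPair : ∀ (ws : List String) (acc : String) (c : Int), PySem.Int.mod c 2 ≠ 0 →
    ((ws.foldl
      (fun (st : String × Int) x =>
        if PySem.Int.mod st.2 2 = 0 then
          (st.1 ++ ((PySem.Str.slice? x none none (-1)).getD "") ++ " ", st.2 + 1)
        else
          (st.1 ++ x ++ " ", st.2 + 1))
      (acc, c)).1).toList
    = acc.toList ++ ((pairsB ws).map (fun w => w.toList ++ [' '])).flatten := by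
  intro ws
  induction ws using pairsB.induct with
  | case1 => intro acc c _; simp [pairsB]
  | case2 w =>
    intro acc c hc
    rw [List.foldl_cons, if_neg hc, List.foldl_nil]
    simp [pairsB, String.toList_append]
  | case3 w x rest ih =>
    intro acc c hc
    have h1 : PySem.Int.mod (c + 1) 2 = 0 := by
      rw [PySem.Int.mod_eq_emod_of_pos (a := c + 1) (by norm_num)]
      rw [PySem.Int.mod_eq_emod_of_pos (a := c) (by norm_num)] at hc
      omega
    have h2 : PySem.Int.mod (c + 1 + 1) 2 ≠ 0 := by
      rw [PySem.Int.mod_eq_emod_of_pos (a := c + 1 + 1) (by norm_num)]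
      rw [PySem.Int.mod_eq_emod_of_pos (a := c) (by norm_num)] at hc
      omega
    rw [List.foldl_cons, if_neg hc, List.foldl_cons, if_pos h1, ih _ _ h2]
    simp [pairsB, String.toList_append]

-- the toList of B's reversed word
lemma toList_revWord (x : String) :
    ((PySem.Str.slice? x none none (-1)).getD "").toList = x.toList.reverse := by
  rw [PySem.Str.slice?_none_none_neg_one, Option.getD_some, String.toList_ofList]

-- pairsB preserves "nonempty and whitespace-free"
lemma pairsB_words : ∀ (ws : List String),
    (∀ w ∈ ws, w.toList ≠ [] ∧ ∀ c ∈ w.toList, PySem.Chars.isspace c = false) →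
    ∀ w ∈ pairsB ws, w.toList ≠ [] ∧ ∀ c ∈ w.toList, PySem.Chars.isspace c = false := by
  intro ws
  induction ws using pairsB.induct with
  | case1 => intro _ w hw; simp [pairsB] at hw
  | case2 v =>
    intro h w hw
    simp only [pairsB, List.mem_singleton] at hw
    subst hw; exact h w List.mem_cons_self
  | case3 v x rest ih =>
    intro h w hw
    simp only [pairsB, List.mem_cons] at hw
    rcases hw with rfl | rfl | hw
    · exact h w List.mem_cons_self
    · obtain ⟨hx1, hx2⟩ := h x (by simp)
      rw [toList_revWord]
      refine ⟨by simpa [List.reverse_eq_nil_iff] using hx1, ?_⟩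
      intro c hc; exact hx2 c (List.mem_reverse.mp hc)
    · exact ih (fun v hv => h v (by simp [hv])) w hw

-- strip of "each word followed by one space" is the ' '-join of the words
lemma join_ne_nil (u : List Char) (rest : List (List Char)) (hu : u ≠ []) :
    PySem.Chars.join [' '] (u :: rest) ≠ [] := by
  cases rest with
  | nil => simpa [PySem.Chars.join_singleton] using hu
  | cons q qs =>
    rw [PySem.Chars.join_cons_cons]
    simp [hu]

lemma lstrip_append_word (v rest : List Char) (hv : v ≠ [])
    (hns : ∀ c ∈ v, PySem.Chars.isspace c = false) :
    PySem.Chars.lstrip (v ++ rest) = v ++ rest := by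
  obtain ⟨d, v', rfl⟩ := List.exists_cons_of_ne_nil hv
  have hd : PySem.Chars.isspace d = false := hns d List.mem_cons_self
  simp [PySem.Chars.lstrip, List.dropWhile_cons_of_neg, hd]

lemma dropWhile_isspace_rev (v : List Char)
    (hns : ∀ c ∈ v, PySem.Chars.isspace c = false) :
    List.dropWhile PySem.Chars.isspace v.reverse = v.reverse := by
  refine List.dropWhile_eq_self_iff.mpr ?_
  intro hl
  simp only [Bool.not_eq_true]
  exact hns _ (List.mem_reverse.mp (v.reverse.getElem_mem hl))

lemma rstrip_word_space (v : List Char) (hns : ∀ c ∈ v, PySem.Chars.isspace c = false) :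
    PySem.Chars.rstrip (v ++ [' ']) = v := by
  rw [PySem.Chars.rstrip, List.reverse_append, List.reverse_singleton, List.singleton_append,
      List.dropWhile_cons_of_pos (by decide), dropWhile_isspace_rev v hns, List.reverse_reverse]

lemma rstrip_append_of_rstrip_ne (A B : List Char) (h : PySem.Chars.rstrip B ≠ []) :
    PySem.Chars.rstrip (A ++ B) = A ++ PySem.Chars.rstrip B := by
  have hdw : ¬ (List.dropWhile PySem.Chars.isspace B.reverse).isEmpty = true := by
    simp only [List.isEmpty_iff]
    intro hc
    apply h
    rw [PySem.Chars.rstrip, hc, List.reverse_nil]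
  rw [PySem.Chars.rstrip, PySem.Chars.rstrip, List.reverse_append, List.dropWhile_append,
      if_neg hdw, List.reverse_append, List.reverse_reverse]

lemma strip_flatten_join : ∀ (vs : List (List Char)),
    (∀ w ∈ vs, w ≠ [] ∧ ∀ c ∈ w, PySem.Chars.isspace c = false) →
    PySem.Chars.strip ((vs.map (fun w => w ++ [' '])).flatten) = PySem.Chars.join [' '] vs := by
  intro vs
  induction vs with
  | nil => intro _; simp [PySem.Chars.strip, PySem.Chars.lstrip, PySem.Chars.rstrip, PySem.Chars.join_nil]
  | cons v vs ih =>
    intro hP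
    obtain ⟨hne, hns⟩ := hP v List.mem_cons_self
    have hPt : ∀ w ∈ vs, w ≠ [] ∧ ∀ c ∈ w, PySem.Chars.isspace c = false :=
      fun w hw => hP w (List.mem_cons_of_mem _ hw)
    rw [List.map_cons, List.flatten_cons, PySem.Chars.strip, List.append_assoc,
        lstrip_append_word v _ hne hns, ← List.append_assoc]
    cases vs with
    | nil =>
      rw [List.map_nil, List.flatten_nil, List.append_nil, rstrip_word_space v hns,
          PySem.Chars.join_singleton]
    | cons u rest =>
      obtain ⟨hu, hus⟩ := hPt u List.mem_cons_self
      have hT : PySem.Chars.rstrip ((List.map (fun w => w ++ [' ']) (u :: rest)).flatten)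
          = PySem.Chars.join [' '] (u :: rest) := by
        have h1 := ih hPt
        rw [PySem.Chars.strip] at h1
        simp only [List.map_cons, List.flatten_cons] at h1
        rw [List.append_assoc, lstrip_append_word u _ hu hus, ← List.append_assoc] at h1
        simp only [List.map_cons, List.flatten_cons]
        exact h1
      have hTne : PySem.Chars.rstrip ((List.map (fun w => w ++ [' ']) (u :: rest)).flatten) ≠ [] := by
        rw [hT]; exact join_ne_nil u rest hu
      rw [rstrip_append_of_rstrip_ne _ _ hTne, hT, PySem.Chars.join_cons_cons, List.append_assoc]

-- ===== VERDICT (by name: the statement is the Claim_ definition above) =====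
theorem reverse_alternate_spec : Claim_equal_reverse_alternate := by
  intro string _
  show reverse_alternate string = reverse_alternate_alt string
  have lhs : reverse_alternate string
      = PySem.Str.strip (((PySem.Str.split₀ string).foldl
          (fun (st : String × Int) x =>
            if PySem.Int.mod st.2 2 = 0 then
              (st.1 ++ ((PySem.Str.slice? x none none (-1)).getD "") ++ " ", st.2 + 1)
            else
              (st.1 ++ x ++ " ", st.2 + 1))
          ("", 1)).1) := rfl
  rw [lhs, reverse_alternate_alt]
  have hfold := foldPair (PySem.Str.split₀ string) "" 1 (by decide)
  rw [show ("" : String).toList = [] from rfl, List.nil_append] at hfold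
  rw [PySem.Str.strip, PySem.Str.join, hfold]
  congr 1
  have hmap : (pairsB (PySem.Str.split₀ string)).map (fun w => w.toList ++ [' '])
      = ((pairsB (PySem.Str.split₀ string)).map String.toList).map (fun w => w ++ [' ']) := by
    rw [List.map_map]; rfl
  rw [hmap, show (" " : String).toList = [' '] from rfl]
  apply strip_flatten_join
  intro w hw
  obtain ⟨v, hv, rfl⟩ := List.mem_map.mp hw
  refine pairsB_words (PySem.Str.split₀ string) ?_ v hv
  intro u hu
  have hchars : u.toList ∈ PySem.Chars.split₀ string.toList := by
    rw [← PySem.Str.split₀_map_toList]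
    exact List.mem_map_of_mem hu
  exact split₀_words string.toList u.toList hchars
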